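-- pv_equiv track=rewrite | github.com/MrBrantCode/unitest_baseline | mut_generate/mist_train_cf/cf_6398/solution.py | find_shortest_subsequence
-- ===== SOURCE A (Python) =====
-- def find_shortest_subsequence(string, word1, word2):
--     word1_pos = -1
--     word2_pos = -1
--     min_length = float('inf')
--     min_subsequence = ""
--
--     for i in range(len(string)):
--         if string[i:].startswith(word1):
--             word1_pos = i
--         if string[i:].startswith(word2):
--             word2_pos = i
--
--         if word1_pos != -1 and word2_pos != -1:
--             start = min(word1_pos, word2_pos)
--             end = max(word1_pos + len(word1) - 1, word2_pos + len(word2) - 1)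
--             length = end - start + 1
--             if length < min_length:
--                 min_length = length
--                 min_subsequence = string[start:end + 1]
--
--     if min_subsequence == "":
--         return "Words not found in the string"
--
--     return min_subsequence
-- ===== SOURCE B (Python) =====
-- def _occurrences(s, w):
--     if not w:
--         return list(range(len(s)))
--     res = []
--     p = s.find(w)
--     while p != -1:
--         res.append(p)
--         p = s.find(w, p + 1)
--     return res
--
--
-- def find_shortest_subsequence(string, word1, word2):
--     set1 = set(_occurrences(string, word1))
--     set2 = set(_occurrences(string, word2))
--     w1pos = w2pos = None
--     best_len = None
--     best = None
--     for p in sorted(set1 | set2):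
--         if p in set1:
--             w1pos = p
--         if p in set2:
--             w2pos = p
--         if w1pos is not None and w2pos is not None:
--             start = min(w1pos, w2pos)
--             end = max(w1pos + len(word1) - 1, w2pos + len(word2) - 1)
--             length = end - start + 1
--             if best_len is None or length < best_len:
--                 best_len = length
--                 best = string[start:end + 1]
--     if not best:
--         return "Words not found in the string"
--     return best
-- ===== Notes on version B (the rewrite author's own statement) =====
-- stated objective: faster
-- what changed: A tests startswith for both words at every index of the string; B builds the occurrence lists of each word with str.find, then sweeps once over the sorted set of occurrence positions only, tracking the latest position of each word.
import Mathlib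
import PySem

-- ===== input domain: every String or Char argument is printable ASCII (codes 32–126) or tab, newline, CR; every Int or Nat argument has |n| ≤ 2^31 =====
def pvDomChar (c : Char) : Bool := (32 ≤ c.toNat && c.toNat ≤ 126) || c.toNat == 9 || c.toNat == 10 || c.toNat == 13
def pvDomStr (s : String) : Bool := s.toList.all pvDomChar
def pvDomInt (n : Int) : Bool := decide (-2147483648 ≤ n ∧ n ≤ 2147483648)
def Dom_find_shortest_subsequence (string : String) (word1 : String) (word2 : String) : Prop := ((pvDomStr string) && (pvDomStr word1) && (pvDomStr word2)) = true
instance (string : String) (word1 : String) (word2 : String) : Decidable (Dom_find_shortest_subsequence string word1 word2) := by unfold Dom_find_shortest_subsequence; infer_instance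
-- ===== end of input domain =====

-- B replaces A's per-index double startswith scan by occurrence lists found with str.find plus a
-- sorted sweep over the occurrence positions only (objective: faster, measured).

-- ===== PORT A =====
-- loop body of A; state = (word1_pos, word2_pos, min_length (none = float('inf')), min_subsequence)
def pvStepA (cs w1 w2 : List Char) (s : Int × Int × Option Int × List Char) (i : Nat) :
    Int × Int × Option Int × List Char :=
  -- string[i:].startswith(w) for 0 ≤ i < len: slice-from is drop (PySem.List.slice_from_natCast)
  let p1 : Int := if PySem.Chars.startswith (cs.drop i) w1 then (i : Int) else s.1
  let p2 : Int := if PySem.Chars.startswith (cs.drop i) w2 then (i : Int) else s.2.1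
  if p1 ≠ -1 ∧ p2 ≠ -1 then
    let start : Int := min p1 p2
    let e : Int := max (p1 + (w1.length : Int) - 1) (p2 + (w2.length : Int) - 1)
    let len : Int := e - start + 1
    if (match s.2.2.1 with | none => true | some m => decide (len < m)) then
      (p1, p2, some len, PySem.List.slice cs (some start) (some (e + 1)))
    else (p1, p2, s.2.2.1, s.2.2.2)
  else (p1, p2, s.2.2.1, s.2.2.2)

def find_shortest_subsequence (string : String) (word1 : String) (word2 : String) : String :=
  let cs := string.toList
  let r := (List.range cs.length).foldl (pvStepA cs word1.toList word2.toList) (-1, -1, none, [])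
  if r.2.2.2 = [] then "Words not found in the string" else String.ofList r.2.2.2

-- ===== PORT B =====
-- hand port of Source B's find loop 'p = s.find(w); while p != -1: res.append(p); p = s.find(w, p+1)':
-- PySem.Chars.findFrom is Python's str.find(w, start); the 'start ≤ len' guard only makes the
-- recursion total (it always holds on the calls made, since matches of a nonempty w lie below len).
def pvOccLoop (cs w : List Char) (start : Nat) : List Nat :=
  if hs : start ≤ cs.length then
    let p := PySem.Chars.findFrom cs w (start : Int)
    if hp : p = -1 then []
    else p.toNat :: pvOccLoop cs w (p.toNat + 1)
  else []
termination_by cs.length + 1 - start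
decreasing_by
  have h := (PySem.Chars.findFrom_natCast_spec cs w start hs hp).1
  omega

-- port of _occurrences
def pvOccurrences (cs w : List Char) : List Nat :=
  if w.isEmpty then List.range cs.length else pvOccLoop cs w 0

-- loop body of Source B's sweep; state = (w1pos, w2pos, best_len, best)
def pvStepB (cs w1 w2 : List Char) (set1 set2 : PySem.Set Nat)
    (s : Option Nat × Option Nat × Option Int × Option (List Char)) (p : Nat) :
    Option Nat × Option Nat × Option Int × Option (List Char) :=
  let p1 := if set1.contains p then some p else s.1
  let p2 := if set2.contains p then some p else s.2.1
  match p1, p2 with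
  | some a, some b =>
    let start : Int := min (a : Int) (b : Int)
    let e : Int := max ((a : Int) + (w1.length : Int) - 1) ((b : Int) + (w2.length : Int) - 1)
    let len : Int := e - start + 1
    if (match s.2.2.1 with | none => true | some m => decide (len < m)) then
      (some a, some b, some len, some (PySem.List.slice cs (some start) (some (e + 1))))
    else (some a, some b, s.2.2.1, s.2.2.2)
  | p1, p2 => (p1, p2, s.2.2.1, s.2.2.2)

def find_shortest_subsequence_alt (string : String) (word1 : String) (word2 : String) : String :=
  let cs := string.toList
  let set1 := PySem.Set.ofList (pvOccurrences cs word1.toList)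
  let set2 := PySem.Set.ofList (pvOccurrences cs word2.toList)
  let events := PySem.List.sorted (PySem.Set.union set1 set2) (fun x => x)
  let r := events.foldl (pvStepB cs word1.toList word2.toList set1 set2) (none, none, none, none)
  match r.2.2.2 with
  | none => "Words not found in the string"
  | some b => if b = [] then "Words not found in the string" else String.ofList b

-- ===== PRECONDITION & SPEC =====
def Spec_find_shortest_subsequence (string : String) (word1 : String) (word2 : String) (out : String) : Prop := out = find_shortest_subsequence_alt string word1 word2
instance (string : String) (word1 : String) (word2 : String) (out : String) : Decidable (Spec_find_shortest_subsequence string word1 word2 out) := by unfold Spec_find_shortest_subsequence; infer_instance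

-- ===== CLAIM (what is proved, stated in full; the proofs are below) =====
def Claim_equal_find_shortest_subsequence : Prop := ∀ (string : String) (word1 : String) (word2 : String), Dom_find_shortest_subsequence string word1 word2 → Spec_find_shortest_subsequence string word1 word2 (find_shortest_subsequence string word1 word2)

-- ===== LEMMAS AND PROOFS =====

-- a prefix of a later drop is an infix of an earlier drop
lemma pvInfix_of_prefix_drop {w cs : List Char} {s i : Nat} (h : s ≤ i)
    (hp : w <+: cs.drop i) : w <:+: cs.drop s := by
  have he : cs.drop i = (cs.drop s).drop (i - s) := by
    rw [List.drop_drop]; congr 1; omega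
  exact hp.isInfix.trans (he ▸ (List.drop_suffix (i - s) (cs.drop s))).isInfix

lemma pvOccLoop_eq (cs w : List Char) (hw : w ≠ []) : ∀ start : Nat,
    pvOccLoop cs w start =
      (List.range' start (cs.length - start)).filter
        (fun i => PySem.Chars.startswith (cs.drop i) w) := by
  intro start
  fun_induction pvOccLoop cs w start with
  | case1 start hs p hp =>
    -- p = -1 : no match at or after start
    have hno : ¬ w <:+: cs.drop start :=
      (PySem.Chars.findFrom_natCast_eq_neg_one_iff cs w start hs).mp hp
    symm
    rw [List.filter_eq_nil_iff]
    intro i hi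
    have hmem := List.mem_range'_1.mp hi
    simp only [PySem.Chars.startswith_iff]
    intro hpref
    exact hno (pvInfix_of_prefix_drop hmem.1 hpref)
  | case2 start hs p hp ih =>
    -- p ≠ -1 : p is the first match at or after start
    obtain ⟨hle, hpref, hmin⟩ := PySem.Chars.findFrom_natCast_spec cs w start hs hp
    set q := p.toNat with hq
    have hsq : start ≤ q := by omega
    have hwlen : 1 ≤ w.length := by
      cases w with | nil => exact absurd rfl hw | cons a l => simp
    have hqlen : q + w.length ≤ cs.length := by
      have := hpref.length_le
      simp [List.length_drop] at this
      omega
    have hqlt : q < cs.length := by omega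
    have hsplit : List.range' start (cs.length - start) =
        List.range' start (q - start) ++ q :: List.range' (q + 1) (cs.length - (q + 1)) := by
      have h2 : List.range' q (cs.length - q) = q :: List.range' (q + 1) (cs.length - (q + 1)) := by
        have he : cs.length - q = (cs.length - (q + 1)) + 1 := by omega
        rw [he, List.range'_succ]
      have h1 := @List.range'_append_1 start (q - start) (cs.length - q)
      rw [Nat.add_sub_cancel' hsq] at h1
      have he2 : q - start + (cs.length - q) = cs.length - start := by omega
      rw [he2] at h1
      rw [← h1, h2]
    rw [hsplit, List.filter_append]
    have hnil : (List.range' start (q - start)).filter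
        (fun i => PySem.Chars.startswith (cs.drop i) w) = [] := by
      rw [List.filter_eq_nil_iff]
      intro i hi
      have hmem := List.mem_range'_1.mp hi
      simp only [PySem.Chars.startswith_iff]
      exact hmin i (by omega) (by omega)
    have hqtrue : PySem.Chars.startswith (cs.drop q) w = true :=
      (PySem.Chars.startswith_iff _ _).mpr hpref
    rw [hnil]
    simp only [List.nil_append, ih]
    simp [hqtrue]
  | case3 start hs =>
    have : cs.length - start = 0 := by omega
    simp [this]

lemma pvOccurrences_eq (cs w : List Char) :
    pvOccurrences cs w =
      (List.range cs.length).filter (fun i => PySem.Chars.startswith (cs.drop i) w) := by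
  unfold pvOccurrences
  by_cases hw : w = []
  · subst hw
    rw [if_pos (by rfl)]
    symm
    rw [List.filter_eq_self]
    intro a _
    simp [PySem.Chars.startswith_iff]
  · rw [if_neg (by simpa [List.isEmpty_iff] using hw), pvOccLoop_eq cs w hw 0,
      List.range_eq_range']
    simp

lemma pvContains_eq (cs w : List Char) (i : Nat) (hi : i < cs.length) :
    (PySem.Set.ofList (pvOccurrences cs w)).contains i =
      PySem.Chars.startswith (cs.drop i) w := by
  rw [Bool.eq_iff_iff, PySem.Set.contains_iff, PySem.Set.mem_ofList, pvOccurrences_eq,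
    List.mem_filter]
  simp [List.mem_range, hi]

lemma pvEvents_eq (cs w1 w2 : List Char) :
    PySem.List.sorted
        (PySem.Set.union (PySem.Set.ofList (pvOccurrences cs w1))
          (PySem.Set.ofList (pvOccurrences cs w2))) (fun x => x) =
      (List.range cs.length).filter
        (fun i => PySem.Chars.startswith (cs.drop i) w1 || PySem.Chars.startswith (cs.drop i) w2) := by
  apply PySem.List.sorted_eq_of_perm_of_pairwise_lt
  · rw [List.perm_ext_iff_of_nodup
      ((List.nodup_range).filter _)
      (PySem.Set.nodup_union _ _ (PySem.Set.nodup_ofList _))]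
    intro a
    rw [PySem.Set.mem_union, PySem.Set.mem_ofList, PySem.Set.mem_ofList,
      pvOccurrences_eq, pvOccurrences_eq, List.mem_filter, List.mem_filter, List.mem_filter]
    simp only [Bool.or_eq_true]
    tauto
  · exact List.pairwise_lt_range.filter _

def pvOpt (o : Option Nat) : Int := match o with | none => -1 | some k => (k : Int)

def pvRel (sa : Int × Int × Option Int × List Char)
    (sb : Option Nat × Option Nat × Option Int × Option (List Char)) : Prop :=
  sa.1 = pvOpt sb.1 ∧ sa.2.1 = pvOpt sb.2.1 ∧ sa.2.2.1 = sb.2.2.1 ∧ sa.2.2.2 = sb.2.2.2.getD []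

def pvInv (w1 w2 : List Char) (sa : Int × Int × Option Int × List Char) : Prop :=
  sa.1 ≠ -1 → sa.2.1 ≠ -1 → ∃ m, sa.2.2.1 = some m ∧
    m ≤ max (sa.1 + (w1.length : Int) - 1) (sa.2.1 + (w2.length : Int) - 1) - min sa.1 sa.2.1 + 1

lemma pvInv_step (cs w1 w2 : List Char) (sa : Int × Int × Option Int × List Char) (i : Nat)
    (h : pvInv w1 w2 sa) : pvInv w1 w2 (pvStepA cs w1 w2 sa i) := by
  obtain ⟨a, b, ml, ms⟩ := sa
  simp only [pvStepA, pvInv] at *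
  by_cases hb : (if PySem.Chars.startswith (cs.drop i) w1 then (i : Int) else a) ≠ -1 ∧
      (if PySem.Chars.startswith (cs.drop i) w2 then (i : Int) else b) ≠ -1
  · rw [if_pos hb]
    cases ml with
    | none =>
      simp only []
      intro _ _
      exact ⟨_, rfl, le_refl _⟩
    | some m =>
      by_cases hlt : (max ((if PySem.Chars.startswith (cs.drop i) w1 then (i : Int) else a) + (w1.length : Int) - 1)
            ((if PySem.Chars.startswith (cs.drop i) w2 then (i : Int) else b) + (w2.length : Int) - 1) -
          min (if PySem.Chars.startswith (cs.drop i) w1 then (i : Int) else a)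
            (if PySem.Chars.startswith (cs.drop i) w2 then (i : Int) else b) + 1) < m
      · rw [if_pos (by simpa using hlt)]
        intro _ _
        exact ⟨_, rfl, le_refl _⟩
      · rw [if_neg (by simpa using hlt)]
        intro _ _
        refine ⟨m, rfl, ?_⟩
        simp only [] at hlt ⊢
        omega
  · rw [if_neg hb]
    intro h1 h2
    exact absurd ⟨h1, h2⟩ hb

lemma pvStepA_skip (cs w1 w2 : List Char) (sa : Int × Int × Option Int × List Char) (i : Nat)
    (h1 : ¬ PySem.Chars.startswith (cs.drop i) w1 = true)
    (h2 : ¬ PySem.Chars.startswith (cs.drop i) w2 = true)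
    (h : pvInv w1 w2 sa) : pvStepA cs w1 w2 sa i = sa := by
  obtain ⟨a, b, ml, ms⟩ := sa
  simp only [pvStepA, pvInv] at *
  rw [if_neg h1, if_neg h2]
  by_cases hb : a ≠ -1 ∧ b ≠ -1
  · obtain ⟨m, hm, hle⟩ := h hb.1 hb.2
    subst hm
    rw [if_pos hb, if_neg (by simpa using (by omega :
      ¬ max (a + (w1.length : Int) - 1) (b + (w2.length : Int) - 1) - min a b + 1 < m))]
  · rw [if_neg hb]

lemma pvStep_rel (cs w1 w2 : List Char) (set1 set2 : PySem.Set Nat)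
    (hc1 : ∀ i < cs.length, set1.contains i = PySem.Chars.startswith (cs.drop i) w1)
    (hc2 : ∀ i < cs.length, set2.contains i = PySem.Chars.startswith (cs.drop i) w2)
    (sa : Int × Int × Option Int × List Char)
    (sb : Option Nat × Option Nat × Option Int × Option (List Char)) (i : Nat)
    (hi : i < cs.length) (hr : pvRel sa sb) :
    pvRel (pvStepA cs w1 w2 sa i) (pvStepB cs w1 w2 set1 set2 sb i) := by
  obtain ⟨a, b, ml, ms⟩ := sa
  obtain ⟨o1, o2, bl, bs⟩ := sb
  obtain ⟨e1, e2, e3, e4⟩ := hr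
  simp only at e1 e2 e3 e4
  subst e1 e2 e3 e4
  simp only [pvStepA, pvStepB, hc1 i hi, hc2 i hi]
  set c1 := PySem.Chars.startswith (cs.drop i) w1 with hc1d
  set c2 := PySem.Chars.startswith (cs.drop i) w2 with hc2d
  have hq1 : (if c1 = true then (i : Int) else pvOpt o1) =
      pvOpt (if c1 = true then some i else o1) := by
    by_cases h : c1 = true <;> simp [h, pvOpt]
  have hq2 : (if c2 = true then (i : Int) else pvOpt o2) =
      pvOpt (if c2 = true then some i else o2) := by
    by_cases h : c2 = true <;> simp [h, pvOpt]
  rw [hq1, hq2]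
  set q1 := if c1 = true then some i else o1 with hq1d
  set q2 := if c2 = true then some i else o2 with hq2d
  cases hm1 : q1 with
  | none =>
    rw [if_neg (by simp [pvOpt])]
    exact ⟨rfl, rfl, rfl, rfl⟩
  | some x =>
    cases hm2 : q2 with
    | none =>
      rw [if_neg (by simp only [pvOpt]; omega)]
      exact ⟨rfl, rfl, rfl, rfl⟩
    | some y =>
      simp only [pvOpt]
      rw [if_pos ⟨by omega, by omega⟩]
      cases ml with
      | none =>
        exact ⟨rfl, rfl, rfl, rfl⟩
      | some m =>
        by_cases hlt : (max ((x : Int) + (w1.length : Int) - 1) ((y : Int) + (w2.length : Int) - 1) -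
            min (x : Int) (y : Int) + 1) < m
        · rw [if_pos (by simpa using hlt), if_pos (by simpa using hlt)]
          exact ⟨rfl, rfl, rfl, rfl⟩
        · rw [if_neg (by simpa using hlt), if_neg (by simpa using hlt)]
          exact ⟨rfl, rfl, rfl, rfl⟩

lemma pvMain (cs w1 w2 : List Char) (set1 set2 : PySem.Set Nat)
    (hc1 : ∀ i < cs.length, set1.contains i = PySem.Chars.startswith (cs.drop i) w1)
    (hc2 : ∀ i < cs.length, set2.contains i = PySem.Chars.startswith (cs.drop i) w2) :
    ∀ (l : List Nat) (sa : Int × Int × Option Int × List Char)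
      (sb : Option Nat × Option Nat × Option Int × Option (List Char)),
      (∀ i ∈ l, i < cs.length) → pvRel sa sb → pvInv w1 w2 sa →
      pvRel (l.foldl (pvStepA cs w1 w2) sa)
        ((l.filter (fun i => PySem.Chars.startswith (cs.drop i) w1
            || PySem.Chars.startswith (cs.drop i) w2)).foldl
          (pvStepB cs w1 w2 set1 set2) sb) := by
  intro l
  induction l with
  | nil => intro sa sb _ hr _; simpa using hr
  | cons i l ih =>
    intro sa sb hl hr hinv
    have hil : i < cs.length := hl i List.mem_cons_self
    by_cases hi : (PySem.Chars.startswith (cs.drop i) w1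
        || PySem.Chars.startswith (cs.drop i) w2) = true
    · rw [List.foldl_cons, List.filter_cons, if_pos hi, List.foldl_cons]
      exact ih _ _ (fun j hj => hl j (List.mem_cons_of_mem _ hj))
        (pvStep_rel cs w1 w2 set1 set2 hc1 hc2 sa sb i hil hr)
        (pvInv_step cs w1 w2 sa i hinv)
    · rw [List.foldl_cons, List.filter_cons, if_neg hi]
      simp only [Bool.or_eq_true, not_or] at hi
      rw [pvStepA_skip cs w1 w2 sa i hi.1 hi.2 hinv]
      exact ih _ _ (fun j hj => hl j (List.mem_cons_of_mem _ hj)) hr hinv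

-- ===== VERDICT (by name: the statement is the Claim_ definition above) =====
theorem find_shortest_subsequence_spec : Claim_equal_find_shortest_subsequence := by
  intro string word1 word2 _
  unfold Spec_find_shortest_subsequence find_shortest_subsequence find_shortest_subsequence_alt
  simp only [pvEvents_eq]
  have hrel := pvMain string.toList word1.toList word2.toList _ _
    (fun i hi => pvContains_eq string.toList word1.toList i hi)
    (fun i hi => pvContains_eq string.toList word2.toList i hi)
    (List.range string.toList.length) (-1, -1, none, []) (none, none, none, none)
    (fun i hi => List.mem_range.mp hi) ⟨rfl, rfl, rfl, rfl⟩ (fun h => absurd rfl h)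
  obtain ⟨-, -, -, h4⟩ := hrel
  cases hB : ((List.filter (fun i => PySem.Chars.startswith (List.drop i string.toList) word1.toList
        || PySem.Chars.startswith (List.drop i string.toList) word2.toList)
      (List.range string.toList.length)).foldl
      (pvStepB string.toList word1.toList word2.toList
        (PySem.Set.ofList (pvOccurrences string.toList word1.toList))
        (PySem.Set.ofList (pvOccurrences string.toList word2.toList)))
      (none, none, none, none)).2.2.2 with
  | none => rw [h4, hB]; simp
  | some bv =>
    rw [h4, hB]
    by_cases hb : bv = [] <;> simp [hb]
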